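-- pv_equiv track=rewrite | github.com/rachel-rigdg/rigd_tbot_public | rigd_tbot/tbot_bot/screeners/universe_validation.py | _dedupe_and_find_dups
-- ===== SOURCE A (Python) =====
-- from typing import List, Dict, Set, Tuple
--
-- def _dedupe_and_find_dups(symbols: List[Dict]) -> Tuple[List[Dict], Set[str]]:
--     seen = set()
--     dups = set()
--     out = []
--     for s in symbols:
--         sym = (s.get("symbol") or "").upper()
--         if not sym:
--             continue
--         if sym in seen:
--             dups.add(sym)
--             continue
--         seen.add(sym)
--         out.append(s)
--     return out, dups
-- ===== SOURCE B (Python) =====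
-- from typing import List, Dict, Set, Tuple
--
-- def _dedupe_and_find_dups(symbols: List[Dict]) -> Tuple[List[Dict], Set[str]]:
--     # Stateless decomposition: precompute the normalized key list once, then two
--     # independent comprehensions decide membership/duplication from key prefixes.
--     keys = [(s.get("symbol") or "").upper() for s in symbols]
--     out = [s for i, (s, k) in enumerate(zip(symbols, keys)) if k and k not in keys[:i]]
--     dups = {k for i, k in enumerate(keys) if k and keys[:i].count(k) == 1}
--     return out, dups
-- ===== Notes on version B (the rewrite author's own statement) =====
-- stated objective: alternative
-- what changed: Replaces the single stateful loop maintaining seen/dups sets by a stateless decomposition: normalize all keys in one pass, then two independent comprehensions select first occurrences (key not in its prefix) and duplicates (key's prefix count equals 1).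
import Mathlib
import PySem

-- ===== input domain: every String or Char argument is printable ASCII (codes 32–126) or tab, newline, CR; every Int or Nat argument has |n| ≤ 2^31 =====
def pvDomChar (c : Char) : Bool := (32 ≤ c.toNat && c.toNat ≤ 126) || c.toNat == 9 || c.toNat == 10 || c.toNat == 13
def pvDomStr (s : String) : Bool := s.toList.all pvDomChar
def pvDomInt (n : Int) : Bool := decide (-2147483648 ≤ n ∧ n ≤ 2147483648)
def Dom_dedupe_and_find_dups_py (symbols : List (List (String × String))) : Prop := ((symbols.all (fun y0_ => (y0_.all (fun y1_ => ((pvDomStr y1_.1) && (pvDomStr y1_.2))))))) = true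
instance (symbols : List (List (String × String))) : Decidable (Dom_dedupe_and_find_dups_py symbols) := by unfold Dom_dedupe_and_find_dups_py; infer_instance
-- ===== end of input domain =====

-- B replaces A's single stateful seen/dups loop by a stateless decomposition (precomputed key
-- list + two independent prefix-based comprehensions); objective: alternative (not faster).

-- ===== PORT A =====
-- sym = (s.get("symbol") or "").upper()  (shared normalization, identical expression in both Pythons)
def pvNorm (s : List (String × String)) : String :=
  PySem.Str.upper (((PySem.Dict.mk s).get? "symbol").getD "")

-- the for-loop of A, carrying seen/dups/out
def pvALoop : List (List (String × String)) → PySem.Set String → PySem.Set String →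
    List (List (String × String)) → (List (List (String × String))) × List String
  | [], _seen, dups, out => (out, dups)
  | s :: t, seen, dups, out =>
    let sym := pvNorm s
    if sym = "" then pvALoop t seen dups out
    else if PySem.Set.contains seen sym then pvALoop t seen (PySem.Set.add dups sym) out
    else pvALoop t (PySem.Set.add seen sym) dups (out ++ [s])

def dedupe_and_find_dups_py (symbols : List (List (String × String))) :
    (List (List (String × String))) × List String :=
  pvALoop symbols PySem.Set.empty PySem.Set.empty []

-- ===== PORT B =====
def dedupe_and_find_dups_py_alt (symbols : List (List (String × String))) :
    (List (List (String × String))) × List String :=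
  let keys := symbols.map pvNorm
  let out := ((PySem.List.enumerate (symbols.zip keys) 0).filter
      (fun p => (p.2.2 != "") && !((PySem.List.slice keys none (some p.1)).contains p.2.2))).map
      (fun p => p.2.1)
  let dups := PySem.Set.ofList (((PySem.List.enumerate keys 0).filter
      (fun p => (p.2 != "") && (PySem.List.count (PySem.List.slice keys none (some p.1)) p.2 == 1))).map
      (fun p => p.2))
  (out, dups)

-- ===== PRECONDITION & SPEC =====
def Spec_dedupe_and_find_dups_py (symbols : List (List (String × String))) (out : (List (List (String × String))) × List String) : Prop := out = dedupe_and_find_dups_py_alt symbols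
instance (symbols : List (List (String × String))) (out : (List (List (String × String))) × List String) : Decidable (Spec_dedupe_and_find_dups_py symbols out) := by unfold Spec_dedupe_and_find_dups_py; infer_instance

-- ===== CLAIM (what is proved, stated in full; the proofs are below) =====
def Claim_equal_dedupe_and_find_dups_py : Prop := ∀ (symbols : List (List (String × String))), Dom_dedupe_and_find_dups_py symbols → Spec_dedupe_and_find_dups_py symbols (dedupe_and_find_dups_py symbols)

-- ===== LEMMAS AND PROOFS =====

-- reference recursions: B's two comprehensions relative to the prefix of already-seen keys
def pvBOut : List (List (String × String)) → List String → List (List (String × String))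
  | [], _ => []
  | s :: t, prev =>
    (if pvNorm s ≠ "" ∧ pvNorm s ∉ prev then [s] else []) ++ pvBOut t (prev ++ [pvNorm s])

def pvBDups : List (List (String × String)) → List String → List String
  | [], _ => []
  | s :: t, prev =>
    (if pvNorm s ≠ "" ∧ prev.count (pvNorm s) = 1 then [pvNorm s] else []) ++
      pvBDups t (prev ++ [pvNorm s])

lemma pvALoop_eq (rest : List (List (String × String))) : ∀ (prev : List String)
    (seen dups : PySem.Set String) (out : List (List (String × String))),
    (∀ x, x ∈ seen ↔ x ≠ "" ∧ x ∈ prev) →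
    (∀ x, x ∈ dups ↔ x ≠ "" ∧ 2 ≤ prev.count x) →
    pvALoop rest seen dups out = (out ++ pvBOut rest prev, dups ++ pvBDups rest prev) := by
  induction rest with
  | nil => intro prev seen dups out _ _; simp [pvALoop, pvBOut, pvBDups]
  | cons s t ih =>
    intro prev seen dups out hseen hdups
    by_cases hs : pvNorm s = ""
    · rw [show pvALoop (s :: t) seen dups out = pvALoop t seen dups out from by
        simp [pvALoop, hs]]
      rw [ih (prev ++ [""]) seen dups out]
      · simp [pvBOut, pvBDups, hs]
      · intro x; rw [hseen]
        by_cases hx : x = "" <;> simp [hx]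
      · intro x; rw [hdups]
        by_cases hx : x = "" <;> simp [hx, List.count_append]
    · by_cases hmem : pvNorm s ∈ seen
      · have hct : PySem.Set.contains seen (pvNorm s) = true := by simpa using hmem
        have hprev : pvNorm s ∈ prev := ((hseen _).mp hmem).2
        have hcnt : 1 ≤ prev.count (pvNorm s) := List.count_pos_iff.mpr hprev
        rw [show pvALoop (s :: t) seen dups out
            = pvALoop t seen (PySem.Set.add dups (pvNorm s)) out from by
          simp [pvALoop, hs, hmem]]
        by_cases h1 : prev.count (pvNorm s) = 1
        · have hnd : pvNorm s ∉ dups := by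
            intro h; have := ((hdups _).mp h).2; omega
          rw [PySem.Set.add_of_not_mem hnd,
            ih (prev ++ [pvNorm s]) seen (dups ++ [pvNorm s]) out]
          · simp [pvBOut, pvBDups, hs, hprev, h1]
          · intro x; rw [hseen]
            by_cases hxs : x = pvNorm s
            · subst hxs; simp [hs, hprev]
            · simp [hxs]
          · intro x
            by_cases hxs : x = pvNorm s
            · subst hxs
              simp only [List.mem_append, List.mem_singleton, List.count_append]
              simp [hs, h1]
            · have hcs : List.count x [pvNorm s] = 0 := by simp [Ne.symm hxs]
              simp only [List.mem_append, List.mem_singleton, hxs, or_false,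
                List.count_append, hcs, Nat.add_zero]
              exact hdups x
        · have hge : 2 ≤ prev.count (pvNorm s) := by omega
          have hnd : pvNorm s ∈ dups := (hdups _).mpr ⟨hs, hge⟩
          rw [PySem.Set.add_of_mem hnd, ih (prev ++ [pvNorm s]) seen dups out]
          · simp [pvBOut, pvBDups, hs, hprev, h1]
          · intro x; rw [hseen]
            by_cases hxs : x = pvNorm s
            · subst hxs; simp [hs, hprev]
            · simp [hxs]
          · intro x; rw [hdups]
            by_cases hxs : x = pvNorm s
            · subst hxs
              simp only [List.count_append]
              have : List.count (pvNorm s) [pvNorm s] = 1 := by simp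
              constructor <;> rintro ⟨hx, h2⟩ <;> exact ⟨hx, by omega⟩
            · have : List.count x [pvNorm s] = 0 := by simp [Ne.symm hxs]
              simp only [List.count_append]
              constructor <;> rintro ⟨hx, h2⟩ <;> exact ⟨hx, by omega⟩
      · have hct : PySem.Set.contains seen (pvNorm s) = false := by simpa using hmem
        have hnprev : pvNorm s ∉ prev := fun h => hmem ((hseen _).mpr ⟨hs, h⟩)
        have hc0 : prev.count (pvNorm s) = 0 := List.count_eq_zero.mpr hnprev
        rw [show pvALoop (s :: t) seen dups out
            = pvALoop t (PySem.Set.add seen (pvNorm s)) dups (out ++ [s]) from by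
          simp [pvALoop, hs, hmem]]
        rw [PySem.Set.add_of_not_mem hmem,
          ih (prev ++ [pvNorm s]) (seen ++ [pvNorm s]) dups (out ++ [s])]
        · simp [pvBOut, pvBDups, hs, hnprev, hc0]
        · intro x
          by_cases hxs : x = pvNorm s
          · subst hxs; simp [hs]
          · simp only [List.mem_append, List.mem_singleton, hxs, or_false]
            rw [hseen]
        · intro x; rw [hdups]
          by_cases hxs : x = pvNorm s
          · subst hxs
            have : List.count (pvNorm s) [pvNorm s] = 1 := by simp
            simp only [List.count_append]
            constructor <;> rintro ⟨hx, h2⟩ <;> exact ⟨hx, by omega⟩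
          · have : List.count x [pvNorm s] = 0 := by simp [Ne.symm hxs]
            simp only [List.count_append]
            constructor <;> rintro ⟨hx, h2⟩ <;> exact ⟨hx, by omega⟩

lemma pvAltOut_eq (rest : List (List (String × String))) : ∀ (prev : List String),
    ((PySem.List.enumerate (rest.zip (rest.map pvNorm)) (prev.length : Int)).filter
        (fun p => (p.2.2 != "") &&
          !((PySem.List.slice (prev ++ rest.map pvNorm) none (some p.1)).contains p.2.2))).map
        (fun p => p.2.1)
      = pvBOut rest prev := by
  induction rest with
  | nil => intro prev; simp [pvBOut, PySem.List.enumerate_nil]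
  | cons s t ih =>
    intro prev
    rw [List.map_cons, List.zip_cons_cons, PySem.List.enumerate_cons, List.filter_cons]
    have hslice : PySem.List.slice (prev ++ pvNorm s :: t.map pvNorm) none
        (some ((prev.length : Nat) : Int)) = prev := by
      rw [PySem.List.slice_to_natCast, List.take_left]
    have harr : prev ++ pvNorm s :: t.map pvNorm = (prev ++ [pvNorm s]) ++ t.map pvNorm := by
      simp
    have hlen : ((prev.length : Int) + 1) = (((prev ++ [pvNorm s]).length : Nat) : Int) := by
      simp
    have hcond : (((pvNorm s) != "") && !(prev.contains (pvNorm s)))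
        = decide (pvNorm s ≠ "" ∧ pvNorm s ∉ prev) := by
      by_cases h1 : pvNorm s = "" <;> by_cases h2 : pvNorm s ∈ prev <;> simp [h1, h2]
    rw [pvBOut]
    by_cases hc : pvNorm s ≠ "" ∧ pvNorm s ∉ prev
    · rw [if_pos (by simp only [hslice, hcond]; exact decide_eq_true hc)]
      rw [List.map_cons, if_pos hc, harr, hlen, ih (prev ++ [pvNorm s])]
      simp
    · rw [if_neg (by simp only [hslice, hcond]; simpa using hc)]
      rw [if_neg hc, harr, hlen, ih (prev ++ [pvNorm s])]
      simp

lemma pvAltDups_eq (rest : List (List (String × String))) : ∀ (prev : List String),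
    ((PySem.List.enumerate (rest.map pvNorm) (prev.length : Int)).filter
        (fun p => (p.2 != "") &&
          (PySem.List.count (PySem.List.slice (prev ++ rest.map pvNorm) none (some p.1)) p.2
            == 1))).map (fun p => p.2)
      = pvBDups rest prev := by
  induction rest with
  | nil => intro prev; simp [pvBDups, PySem.List.enumerate_nil]
  | cons s t ih =>
    intro prev
    rw [List.map_cons, PySem.List.enumerate_cons, List.filter_cons]
    have hslice : PySem.List.slice (prev ++ pvNorm s :: t.map pvNorm) none
        (some ((prev.length : Nat) : Int)) = prev := by
      rw [PySem.List.slice_to_natCast, List.take_left]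
    have harr : prev ++ pvNorm s :: t.map pvNorm = (prev ++ [pvNorm s]) ++ t.map pvNorm := by
      simp
    have hlen : ((prev.length : Int) + 1) = (((prev ++ [pvNorm s]).length : Nat) : Int) := by
      simp
    have hcond : (((pvNorm s) != "") && (PySem.List.count prev (pvNorm s) == 1))
        = decide (pvNorm s ≠ "" ∧ prev.count (pvNorm s) = 1) := by
      by_cases h1 : pvNorm s = "" <;> by_cases h2 : prev.count (pvNorm s) = 1 <;>
        simp [h1, h2, PySem.List.count_eq]
    rw [pvBDups]
    by_cases hc : pvNorm s ≠ "" ∧ prev.count (pvNorm s) = 1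
    · rw [if_pos (by simp only [hslice, hcond]; exact decide_eq_true hc)]
      rw [List.map_cons, if_pos hc, harr, hlen, ih (prev ++ [pvNorm s])]
      simp
    · rw [if_neg (by simp only [hslice, hcond]; simpa using hc)]
      rw [if_neg hc, harr, hlen, ih (prev ++ [pvNorm s])]
      simp

lemma pvBDups_count_le (rest : List (List (String × String))) : ∀ (prev : List String)
    (k : String), k ∈ pvBDups rest prev → prev.count k ≤ 1 := by
  induction rest with
  | nil => intro prev k h; simp [pvBDups] at h
  | cons s t ih =>
    intro prev k h
    rw [pvBDups] at h
    rcases List.mem_append.mp h with h1 | h2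
    · split_ifs at h1 with hc
      · simp at h1; subst h1; omega
      · simp at h1
    · have := ih (prev ++ [pvNorm s]) k h2
      simp [List.count_append] at this
      omega

lemma pvBDups_nodup (rest : List (List (String × String))) : ∀ (prev : List String),
    (pvBDups rest prev).Nodup := by
  induction rest with
  | nil => intro prev; simp [pvBDups]
  | cons s t ih =>
    intro prev
    rw [pvBDups]
    split_ifs with hc
    · simp only [List.singleton_append, List.nodup_cons]
      refine ⟨fun h => ?_, ih _⟩
      have := pvBDups_count_le t (prev ++ [pvNorm s]) (pvNorm s) h
      simp [List.count_append, hc.2] at this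
    · simpa using ih (prev ++ [pvNorm s])

-- ===== VERDICT (by name: the statement is the Claim_ definition above) =====
theorem dedupe_and_find_dups_py_spec : Claim_equal_dedupe_and_find_dups_py := by
  intro symbols _
  unfold Spec_dedupe_and_find_dups_py dedupe_and_find_dups_py
  rw [pvALoop_eq symbols [] PySem.Set.empty PySem.Set.empty []
    (by intro x; simp [PySem.Set.empty]) (by intro x; simp [PySem.Set.empty])]
  have hOut := pvAltOut_eq symbols []
  have hDups := pvAltDups_eq symbols []
  simp only [List.length_nil, Nat.cast_zero, List.nil_append] at hOut hDups
  simp only [dedupe_and_find_dups_py_alt]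
  rw [hOut, hDups]
  have hof : PySem.Set.ofList (pvBDups symbols []) = pvBDups symbols [] :=
    PySem.Set.ofList_eq_self_of_nodup _ (pvBDups_nodup symbols [])
  rw [hof]
  simp [PySem.Set.empty]
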